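-- pv_equiv track=rewrite | github.com/bayufedra/ipti | core/portinfo.py | categorize_ports
-- ===== SOURCE A (Python) =====
-- from typing import Dict, List, Optional, Tuple
--
-- WEB_SERVICES = {80, 443, 8080, 8443, 3000, 5000, 8000, 9000}
--
-- DATABASE_SERVICES = {1433, 1521, 3306, 5432, 27017, 6379, 9200}
--
-- MAIL_SERVICES = {25, 110, 143, 465, 587, 993, 995}
--
-- REMOTE_ACCESS = {22, 23, 3389, 5900, 5901, 5902}
--
-- FILE_SERVICES = {21, 135, 139, 445, 2049}
--
-- def categorize_ports(ports: List[int]) -> Dict[str, List[int]]: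
--
--     categories = {
--         "web_services": [],
--         "database_services": [],
--         "mail_services": [],
--         "remote_access": [],
--         "file_services": [],
--         "other_services": []
--     }
--
--     for port in ports:
--         if port in WEB_SERVICES:
--             categories["web_services"].append(port)
--         elif port in DATABASE_SERVICES:
--             categories["database_services"].append(port)
--         elif port in MAIL_SERVICES:
--             categories["mail_services"].append(port)
--         elif port in REMOTE_ACCESS:
--             categories["remote_access"].append(port)
--         elif port in FILE_SERVICES:
--             categories["file_services"].append(port)
--         else:
--             categories["other_services"].append(port)
--
--     return categories
-- ===== SOURCE B (Python) =====
-- _SETS = [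
--     ("web_services", {80, 443, 8080, 8443, 3000, 5000, 8000, 9000}),
--     ("database_services", {1433, 1521, 3306, 5432, 27017, 6379, 9200}),
--     ("mail_services", {25, 110, 143, 465, 587, 993, 995}),
--     ("remote_access", {22, 23, 3389, 5900, 5901, 5902}),
--     ("file_services", {21, 135, 139, 445, 2049}),
-- ]
--
-- _KNOWN = set(p for _, s in _SETS for p in s)
--
--
-- def categorize_ports(ports):
--     # The five service sets are pairwise disjoint, so each category is simply
--     # the input filtered by membership in its set; one extra pass collects the rest.
--     categories = {name: [p for p in ports if p in s] for name, s in _SETS}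
--     categories["other_services"] = [p for p in ports if p not in _KNOWN]
--     return categories
-- ===== Notes on version B (the rewrite author's own statement) =====
-- stated objective: alternative
-- what changed: A's single dispatch loop appending each port into an accumulator dict via a five-way elif cascade is replaced by six independent filter passes: each category is the input list filtered by membership in its (disjoint) set, plus one pass collecting ports in no set.
import Mathlib
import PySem

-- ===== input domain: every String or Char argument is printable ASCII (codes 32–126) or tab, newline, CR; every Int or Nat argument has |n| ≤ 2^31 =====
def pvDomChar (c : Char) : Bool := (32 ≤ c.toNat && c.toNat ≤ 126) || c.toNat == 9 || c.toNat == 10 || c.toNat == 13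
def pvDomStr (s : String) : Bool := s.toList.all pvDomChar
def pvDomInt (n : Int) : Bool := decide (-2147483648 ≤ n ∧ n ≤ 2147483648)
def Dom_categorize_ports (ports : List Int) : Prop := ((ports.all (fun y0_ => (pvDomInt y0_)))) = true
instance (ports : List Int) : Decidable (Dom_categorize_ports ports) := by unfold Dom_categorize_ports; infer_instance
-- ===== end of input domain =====

-- B replaces A's single dispatch loop (elif cascade appending into an accumulator dict) by six
-- independent filter passes over the input, one per (disjoint) category set (objective: alternative).

-- ===== PORT A =====
def WEB_SERVICES : List Int := [80, 443, 8080, 8443, 3000, 5000, 8000, 9000]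
def DATABASE_SERVICES : List Int := [1433, 1521, 3306, 5432, 27017, 6379, 9200]
def MAIL_SERVICES : List Int := [25, 110, 143, 465, 587, 993, 995]
def REMOTE_ACCESS : List Int := [22, 23, 3389, 5900, 5901, 5902]
def FILE_SERVICES : List Int := [21, 135, 139, 445, 2049]

-- the loop body of A's for-loop, factored as a helper
def stepA (categories : PySem.Dict String (List Int)) (port : Int) : PySem.Dict String (List Int) :=
  if WEB_SERVICES.contains port then categories.modify "web_services" [] (· ++ [port])
  else if DATABASE_SERVICES.contains port then categories.modify "database_services" [] (· ++ [port])
  else if MAIL_SERVICES.contains port then categories.modify "mail_services" [] (· ++ [port])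
  else if REMOTE_ACCESS.contains port then categories.modify "remote_access" [] (· ++ [port])
  else if FILE_SERVICES.contains port then categories.modify "file_services" [] (· ++ [port])
  else categories.modify "other_services" [] (· ++ [port])

def categorize_ports (ports : List Int) : List (String × List Int) :=
  let categories : PySem.Dict String (List Int) := PySem.Dict.ofList
    [("web_services", []), ("database_services", []), ("mail_services", []),
     ("remote_access", []), ("file_services", []), ("other_services", [])]
  (ports.foldl stepA categories).items

-- ===== PORT B =====
def B_SETS : List (String × List Int) :=
  [("web_services", [80, 443, 8080, 8443, 3000, 5000, 8000, 9000]),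
   ("database_services", [1433, 1521, 3306, 5432, 27017, 6379, 9200]),
   ("mail_services", [25, 110, 143, 465, 587, 993, 995]),
   ("remote_access", [22, 23, 3389, 5900, 5901, 5902]),
   ("file_services", [21, 135, 139, 445, 2049])]

def B_KNOWN : List Int := PySem.Set.ofList (B_SETS.flatMap (fun nv => nv.2))

def categorize_ports_alt (ports : List Int) : List (String × List Int) :=
  let categories : PySem.Dict String (List Int) :=
    PySem.Dict.ofList (B_SETS.map (fun nv => (nv.1, ports.filter (fun p => nv.2.contains p))))
  let categories := categories.insert "other_services" (ports.filter (fun p => !B_KNOWN.contains p))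
  categories.items

-- ===== PRECONDITION & SPEC =====
def Spec_categorize_ports (ports : List Int) (out : List (String × List Int)) : Prop := out = categorize_ports_alt ports
instance (ports : List Int) (out : List (String × List Int)) : Decidable (Spec_categorize_ports ports out) := by unfold Spec_categorize_ports; infer_instance

-- ===== CLAIM (what is proved, stated in full; the proofs are below) =====
def Claim_equal_categorize_ports : Prop := ∀ (ports : List Int), Dom_categorize_ports ports → Spec_categorize_ports ports (categorize_ports ports)

-- ===== LEMMAS AND PROOFS =====

-- the cascade filters of A, one per category
def fW (p : Int) : Bool := WEB_SERVICES.contains p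
def fD (p : Int) : Bool := !fW p && DATABASE_SERVICES.contains p
def fM (p : Int) : Bool := !fW p && !DATABASE_SERVICES.contains p && MAIL_SERVICES.contains p
def fR (p : Int) : Bool := !fW p && !DATABASE_SERVICES.contains p && !MAIL_SERVICES.contains p && REMOTE_ACCESS.contains p
def fF (p : Int) : Bool := !fW p && !DATABASE_SERVICES.contains p && !MAIL_SERVICES.contains p && !REMOTE_ACCESS.contains p && FILE_SERVICES.contains p
def fO (p : Int) : Bool := !fW p && !DATABASE_SERVICES.contains p && !MAIL_SERVICES.contains p && !REMOTE_ACCESS.contains p && !FILE_SERVICES.contains p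

-- loop invariant for A's fold: each category value accumulates its cascade-filter of the remaining list
theorem foldl_stepA (l : List Int) (a1 a2 a3 a4 a5 a6 : List Int) :
    l.foldl stepA (PySem.Dict.ofList
      [("web_services", a1), ("database_services", a2), ("mail_services", a3), ("remote_access", a4), ("file_services", a5), ("other_services", a6)])
    = PySem.Dict.ofList
      [("web_services", a1 ++ l.filter fW), ("database_services", a2 ++ l.filter fD), ("mail_services", a3 ++ l.filter fM), ("remote_access", a4 ++ l.filter fR), ("file_services", a5 ++ l.filter fF), ("other_services", a6 ++ l.filter fO)] := by
  induction l generalizing a1 a2 a3 a4 a5 a6 with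
  | nil => simp
  | cons p xs ih =>
    rw [List.foldl_cons]
    by_cases hw : WEB_SERVICES.contains p = true
    case pos =>
      have hs : stepA (PySem.Dict.ofList
          [("web_services", a1), ("database_services", a2), ("mail_services", a3), ("remote_access", a4), ("file_services", a5), ("other_services", a6)]) p
          = PySem.Dict.ofList
          [("web_services", a1 ++ [p]), ("database_services", a2), ("mail_services", a3), ("remote_access", a4), ("file_services", a5), ("other_services", a6)] := by
        simp only [stepA, hw]; rfl
      have hwm : p ∈ WEB_SERVICES := by simpa using hw
      have e0 : fW p = true := by simp [fW, hwm]
      have e1 : fD p = false := by simp [fD, fW, hwm]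
      have e2 : fM p = false := by simp [fM, fW, hwm]
      have e3 : fR p = false := by simp [fR, fW, hwm]
      have e4 : fF p = false := by simp [fF, fW, hwm]
      have e5 : fO p = false := by simp [fO, fW, hwm]
      rw [hs, ih]
      simp [e0, e1, e2, e3, e4, e5]
    case neg =>
    have hw' : WEB_SERVICES.contains p = false := by simpa using hw
    by_cases hd : DATABASE_SERVICES.contains p = true
    case pos =>
      have hs : stepA (PySem.Dict.ofList
          [("web_services", a1), ("database_services", a2), ("mail_services", a3), ("remote_access", a4), ("file_services", a5), ("other_services", a6)]) p
          = PySem.Dict.ofList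
          [("web_services", a1), ("database_services", a2 ++ [p]), ("mail_services", a3), ("remote_access", a4), ("file_services", a5), ("other_services", a6)] := by
        simp only [stepA, hw', hd]; rfl
      have hwm : p ∉ WEB_SERVICES := by simpa using hw'
      have hdm : p ∈ DATABASE_SERVICES := by simpa using hd
      have e0 : fW p = false := by simp [fW, hwm]
      have e1 : fD p = true := by simp [fD, fW, hwm, hdm]
      have e2 : fM p = false := by simp [fM, hdm]
      have e3 : fR p = false := by simp [fR, hdm]
      have e4 : fF p = false := by simp [fF, hdm]
      have e5 : fO p = false := by simp [fO, hdm]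
      rw [hs, ih]
      simp [e0, e1, e2, e3, e4, e5]
    case neg =>
    have hd' : DATABASE_SERVICES.contains p = false := by simpa using hd
    by_cases hm : MAIL_SERVICES.contains p = true
    case pos =>
      have hs : stepA (PySem.Dict.ofList
          [("web_services", a1), ("database_services", a2), ("mail_services", a3), ("remote_access", a4), ("file_services", a5), ("other_services", a6)]) p
          = PySem.Dict.ofList
          [("web_services", a1), ("database_services", a2), ("mail_services", a3 ++ [p]), ("remote_access", a4), ("file_services", a5), ("other_services", a6)] := by
        simp only [stepA, hw', hd', hm]; rfl
      have hwm : p ∉ WEB_SERVICES := by simpa using hw'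
      have hdm : p ∉ DATABASE_SERVICES := by simpa using hd'
      have hmm : p ∈ MAIL_SERVICES := by simpa using hm
      have e0 : fW p = false := by simp [fW, hwm]
      have e1 : fD p = false := by simp [fD, hdm]
      have e2 : fM p = true := by simp [fM, fW, hwm, hdm, hmm]
      have e3 : fR p = false := by simp [fR, hmm]
      have e4 : fF p = false := by simp [fF, hmm]
      have e5 : fO p = false := by simp [fO, hmm]
      rw [hs, ih]
      simp [e0, e1, e2, e3, e4, e5]
    case neg =>
    have hm' : MAIL_SERVICES.contains p = false := by simpa using hm
    by_cases hr : REMOTE_ACCESS.contains p = true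
    case pos =>
      have hs : stepA (PySem.Dict.ofList
          [("web_services", a1), ("database_services", a2), ("mail_services", a3), ("remote_access", a4), ("file_services", a5), ("other_services", a6)]) p
          = PySem.Dict.ofList
          [("web_services", a1), ("database_services", a2), ("mail_services", a3), ("remote_access", a4 ++ [p]), ("file_services", a5), ("other_services", a6)] := by
        simp only [stepA, hw', hd', hm', hr]; rfl
      have hwm : p ∉ WEB_SERVICES := by simpa using hw'
      have hdm : p ∉ DATABASE_SERVICES := by simpa using hd'
      have hmm : p ∉ MAIL_SERVICES := by simpa using hm'
      have hrm : p ∈ REMOTE_ACCESS := by simpa using hr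
      have e0 : fW p = false := by simp [fW, hwm]
      have e1 : fD p = false := by simp [fD, hdm]
      have e2 : fM p = false := by simp [fM, hmm]
      have e3 : fR p = true := by simp [fR, fW, hwm, hdm, hmm, hrm]
      have e4 : fF p = false := by simp [fF, hrm]
      have e5 : fO p = false := by simp [fO, hrm]
      rw [hs, ih]
      simp [e0, e1, e2, e3, e4, e5]
    case neg =>
    have hr' : REMOTE_ACCESS.contains p = false := by simpa using hr
    by_cases hf : FILE_SERVICES.contains p = true
    case pos =>
      have hs : stepA (PySem.Dict.ofList
          [("web_services", a1), ("database_services", a2), ("mail_services", a3), ("remote_access", a4), ("file_services", a5), ("other_services", a6)]) p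
          = PySem.Dict.ofList
          [("web_services", a1), ("database_services", a2), ("mail_services", a3), ("remote_access", a4), ("file_services", a5 ++ [p]), ("other_services", a6)] := by
        simp only [stepA, hw', hd', hm', hr', hf]; rfl
      have hwm : p ∉ WEB_SERVICES := by simpa using hw'
      have hdm : p ∉ DATABASE_SERVICES := by simpa using hd'
      have hmm : p ∉ MAIL_SERVICES := by simpa using hm'
      have hrm : p ∉ REMOTE_ACCESS := by simpa using hr'
      have hfm : p ∈ FILE_SERVICES := by simpa using hf
      have e0 : fW p = false := by simp [fW, hwm]
      have e1 : fD p = false := by simp [fD, hdm]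
      have e2 : fM p = false := by simp [fM, hmm]
      have e3 : fR p = false := by simp [fR, hrm]
      have e4 : fF p = true := by simp [fF, fW, hwm, hdm, hmm, hrm, hfm]
      have e5 : fO p = false := by simp [fO, hfm]
      rw [hs, ih]
      simp [e0, e1, e2, e3, e4, e5]
    case neg =>
      have hf' : FILE_SERVICES.contains p = false := by simpa using hf
      have hs : stepA (PySem.Dict.ofList
          [("web_services", a1), ("database_services", a2), ("mail_services", a3), ("remote_access", a4), ("file_services", a5), ("other_services", a6)]) p
          = PySem.Dict.ofList
          [("web_services", a1), ("database_services", a2), ("mail_services", a3), ("remote_access", a4), ("file_services", a5), ("other_services", a6 ++ [p])] := by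
        simp only [stepA, hw', hd', hm', hr', hf']; rfl
      have hwm : p ∉ WEB_SERVICES := by simpa using hw'
      have hdm : p ∉ DATABASE_SERVICES := by simpa using hd'
      have hmm : p ∉ MAIL_SERVICES := by simpa using hm'
      have hrm : p ∉ REMOTE_ACCESS := by simpa using hr'
      have hfm : p ∉ FILE_SERVICES := by simpa using hf'
      have e0 : fW p = false := by simp [fW, hwm]
      have e1 : fD p = false := by simp [fD, hdm]
      have e2 : fM p = false := by simp [fM, hmm]
      have e3 : fR p = false := by simp [fR, hrm]
      have e4 : fF p = false := by simp [fF, hfm]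
      have e5 : fO p = true := by simp [fO, fW, hwm, hdm, hmm, hrm, hfm]
      rw [hs, ih]
      simp [e0, e1, e2, e3, e4, e5]

-- the five sets are pairwise disjoint, so the cascade filters coincide with plain membership
theorem db_disj (p : Int) (h : p ∈ DATABASE_SERVICES) : p ∉ WEB_SERVICES := by
  simp [DATABASE_SERVICES] at h
  rcases h with rfl | rfl | rfl | rfl | rfl | rfl | rfl <;> decide

theorem mail_disj (p : Int) (h : p ∈ MAIL_SERVICES) :
    p ∉ WEB_SERVICES ∧ p ∉ DATABASE_SERVICES := by
  simp [MAIL_SERVICES] at h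
  rcases h with rfl | rfl | rfl | rfl | rfl | rfl | rfl <;> exact ⟨by decide, by decide⟩

theorem ra_disj (p : Int) (h : p ∈ REMOTE_ACCESS) :
    p ∉ WEB_SERVICES ∧ p ∉ DATABASE_SERVICES ∧ p ∉ MAIL_SERVICES := by
  simp [REMOTE_ACCESS] at h
  rcases h with rfl | rfl | rfl | rfl | rfl | rfl <;> exact ⟨by decide, by decide, by decide⟩

theorem file_disj (p : Int) (h : p ∈ FILE_SERVICES) :
    p ∉ WEB_SERVICES ∧ p ∉ DATABASE_SERVICES ∧ p ∉ MAIL_SERVICES ∧ p ∉ REMOTE_ACCESS := by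
  simp [FILE_SERVICES] at h
  rcases h with rfl | rfl | rfl | rfl | rfl <;> exact ⟨by decide, by decide, by decide, by decide⟩

theorem fD_eq (p : Int) : fD p = DATABASE_SERVICES.contains p := by
  by_cases h : p ∈ DATABASE_SERVICES
  · have h1 := db_disj p h
    simp [fD, fW, h, h1]
  · simp [fD, h]

theorem fM_eq (p : Int) : fM p = MAIL_SERVICES.contains p := by
  by_cases h : p ∈ MAIL_SERVICES
  · obtain ⟨h1, h2⟩ := mail_disj p h
    simp [fM, fW, h, h1, h2]
  · simp [fM, h]

theorem fR_eq (p : Int) : fR p = REMOTE_ACCESS.contains p := by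
  by_cases h : p ∈ REMOTE_ACCESS
  · obtain ⟨h1, h2, h3⟩ := ra_disj p h
    simp [fR, fW, h, h1, h2, h3]
  · simp [fR, h]

theorem fF_eq (p : Int) : fF p = FILE_SERVICES.contains p := by
  by_cases h : p ∈ FILE_SERVICES
  · obtain ⟨h1, h2, h3, h4⟩ := file_disj p h
    simp [fF, fW, h, h1, h2, h3, h4]
  · simp [fF, h]

theorem fO_eq (p : Int) : fO p = !B_KNOWN.contains p := by
  have hK : B_KNOWN = WEB_SERVICES ++ DATABASE_SERVICES ++ MAIL_SERVICES ++ REMOTE_ACCESS ++ FILE_SERVICES := by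
    decide
  by_cases h1 : p ∈ WEB_SERVICES <;> by_cases h2 : p ∈ DATABASE_SERVICES <;>
    by_cases h3 : p ∈ MAIL_SERVICES <;> by_cases h4 : p ∈ REMOTE_ACCESS <;>
    by_cases h5 : p ∈ FILE_SERVICES <;>
    simp [fO, fW, hK, List.mem_append, h1, h2, h3, h4, h5]

-- ===== VERDICT (by name: the statement is the Claim_ definition above) =====
theorem categorize_ports_spec : Claim_equal_categorize_ports := by
  intro ports _
  show (ports.foldl stepA (PySem.Dict.ofList
    [("web_services", []), ("database_services", []), ("mail_services", []),
     ("remote_access", []), ("file_services", []), ("other_services", [])])).items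
    = categorize_ports_alt ports
  rw [foldl_stepA]
  show [("web_services", [] ++ ports.filter fW), ("database_services", [] ++ ports.filter fD),
        ("mail_services", [] ++ ports.filter fM), ("remote_access", [] ++ ports.filter fR),
        ("file_services", [] ++ ports.filter fF), ("other_services", [] ++ ports.filter fO)]
    = categorize_ports_alt ports
  have hW : ports.filter fW = ports.filter (fun p => WEB_SERVICES.contains p) := rfl
  simp only [List.nil_append, hW, List.filter_congr (fun p _ => fD_eq p),
    List.filter_congr (fun p _ => fM_eq p), List.filter_congr (fun p _ => fR_eq p),
    List.filter_congr (fun p _ => fF_eq p), List.filter_congr (fun p _ => fO_eq p)]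
  rfl
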